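-- pv_equiv track=rewrite | github.com/ZainMunir/Net-Celerity | Plotters/bar_combined.py | sort_list2_by_list1
-- ===== SOURCE A (Python) =====
-- def sort_list2_by_list1(list1, list2):
--     order_dict = {value: index for index, value in enumerate(list1)}
--
--     def extract_key(item):
--         key_part = item.split(".")[0]
--         return order_dict.get(
--             key_part, float("inf")
--         )
--
--     sorted_list2 = sorted(list2, key=extract_key)
--
--     return sorted_list2
-- ===== SOURCE B (Python) =====
-- def sort_list2_by_list1(list1, list2):
--     order_dict = {value: index for index, value in enumerate(list1)}
--     buckets = [[] for _ in list1]
--     not_found = []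
--     for item in list2:
--         idx = order_dict.get(item.split(".")[0])
--         if idx is None:
--             not_found.append(item)
--         else:
--             buckets[idx].append(item)
--     result = []
--     for b in buckets:
--         result.extend(b)
--     result.extend(not_found)
--     return result
-- ===== Notes on version B (the rewrite author's own statement) =====
-- stated objective: alternative
-- what changed: Replaces the comparison sort keyed by prefix index with a single-pass bucket distribution: one bucket per list1 position plus a not_found list, appended in list2 order and concatenated, so no sort is performed.
import Mathlib
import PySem

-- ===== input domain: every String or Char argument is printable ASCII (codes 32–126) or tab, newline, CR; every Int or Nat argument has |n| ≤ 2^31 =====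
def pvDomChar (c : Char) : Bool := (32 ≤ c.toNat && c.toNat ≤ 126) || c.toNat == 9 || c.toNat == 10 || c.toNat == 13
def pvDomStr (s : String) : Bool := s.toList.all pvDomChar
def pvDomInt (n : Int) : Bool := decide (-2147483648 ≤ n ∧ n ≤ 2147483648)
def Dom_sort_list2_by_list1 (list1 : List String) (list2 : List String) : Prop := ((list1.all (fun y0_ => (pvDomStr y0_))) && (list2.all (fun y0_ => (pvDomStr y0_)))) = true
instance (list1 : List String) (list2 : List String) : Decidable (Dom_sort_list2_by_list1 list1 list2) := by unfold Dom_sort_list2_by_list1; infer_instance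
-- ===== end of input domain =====

-- B replaces A's comparison sort (key = prefix index, missing = inf) by a one-pass bucket
-- distribution into len(list1) buckets plus a not_found list; same return value, no sort.


-- ===== PORT A =====
-- item.split(".")[0]: split? with a non-empty separator always returns some non-empty list,
-- so getD/headD never take their defaults (exact).
def pvPrefix (item : String) : String := ((PySem.Str.split? item ".").getD []).headD ""

-- order_dict = {value: index for index, value in enumerate(list1)}
def pvOrderDict (list1 : List String) : PySem.Dict String Int :=
  (PySem.List.enumerate list1).foldl (fun d p => d.insert p.2 p.1) PySem.Dict.empty

-- sorted(list2, key=extract_key); float("inf") is ported as len(list1): every dict value is an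
-- index < len(list1), so the key comparisons (hence the stable sort) are identical (exact).
def sort_list2_by_list1 (list1 : List String) (list2 : List String) : List String :=
  PySem.List.sorted list2
    (fun item => (pvOrderDict list1).getD (pvPrefix item) (list1.length : Int)) false

-- ===== PORT B =====
-- the loop body: append item to its bucket (dict values are indices 0 ≤ i < len(list1), so
-- buckets[idx] is in range and set/getD at i.toNat are exact) or to not_found
def pvStep (d : PySem.Dict String Int) (st : List (List String) × List String) (item : String) :
    List (List String) × List String :=
  match d.get? (pvPrefix item) with
  | none => (st.1, st.2 ++ [item])
  | some i => (st.1.set i.toNat (st.1.getD i.toNat [] ++ [item]), st.2)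

def sort_list2_by_list1_alt (list1 : List String) (list2 : List String) : List String :=
  let d := pvOrderDict list1
  let st := list2.foldl (pvStep d) (List.replicate list1.length ([] : List String), ([] : List String))
  (st.1.foldl (fun acc b => acc ++ b) []) ++ st.2

-- ===== PRECONDITION & SPEC =====
def Spec_sort_list2_by_list1 (list1 : List String) (list2 : List String) (out : List String) : Prop := out = sort_list2_by_list1_alt list1 list2
instance (list1 : List String) (list2 : List String) (out : List String) : Decidable (Spec_sort_list2_by_list1 list1 list2 out) := by unfold Spec_sort_list2_by_list1; infer_instance

-- ===== CLAIM (what is proved, stated in full; the proofs are below) =====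
def Claim_equal_sort_list2_by_list1 : Prop := ∀ (list1 : List String) (list2 : List String), Dom_sort_list2_by_list1 list1 list2 → Spec_sort_list2_by_list1 list1 list2 (sort_list2_by_list1 list1 list2)

-- ===== LEMMAS AND PROOFS =====

-- the sort key shared by both sides
def pvKey (list1 : List String) (item : String) : Int :=
  (pvOrderDict list1).getD (pvPrefix item) (list1.length : Int)

theorem insertBy_split {α : Type} (key : α → Int) (x : α) (l1 l2 : List α)
    (h1 : ∀ y ∈ l1, ¬ key x < key y) (h2 : ∀ y ∈ l2, key x < key y) :
    PySem.List.insertBy (fun a b => decide (key a < key b)) x (l1 ++ l2) = l1 ++ x :: l2 := by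
  induction l1 with
  | nil =>
    cases l2 with
    | nil => simp [PySem.List.insertBy]
    | cons y t => simp [PySem.List.insertBy, h2 y (by simp)]
  | cons y t ih =>
    simp only [List.cons_append, PySem.List.insertBy]
    rw [if_neg (by simp [h1 y (by simp)]), ih (fun z hz => h1 z (by simp [hz]))]
theorem values_foldl_bound (P : Int → Prop) (l : List (Int × String)) :
    ∀ (d : PySem.Dict String Int), (∀ v ∈ d.values, P v) → (∀ p ∈ l, P p.1) →
    ∀ v ∈ (l.foldl (fun d p => d.insert p.2 p.1) d).values, P v := by
  induction l with
  | nil => intro d hd _ v hv; exact hd v hv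
  | cons p t ih =>
    intro d hd hl v hv
    refine ih (d.insert p.2 p.1) ?_ (fun q hq => hl q (by simp [hq])) v hv
    intro w hw
    rcases PySem.Dict.mem_values_insert _ _ _ _ hw with h | h
    · exact h ▸ hl p (by simp)
    · exact hd w h

theorem pvOrderDict_value_bound (list1 : List String) (k : String) (v : Int)
    (h : (pvOrderDict list1).get? k = some v) :
    0 ≤ v ∧ v < (list1.length : Int) := by
  have hv : v ∈ ((PySem.List.enumerate list1).foldl (fun d p => d.insert p.2 p.1) PySem.Dict.empty).values :=
    List.mem_map.2 ⟨(k, v), PySem.Dict.mem_items_of_get?_eq_some _ h, rfl⟩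

  refine values_foldl_bound (fun v => 0 ≤ v ∧ v < (list1.length : Int)) _ _ (by simp [PySem.Dict.values, PySem.Dict.empty]) ?_ v hv
  intro p hp
  rcases (PySem.List.mem_enumerate_iff _ _ _).1 hp with ⟨j, hj, rfl⟩
  constructor <;> simp <;> omega

theorem flatMap_filter_congr {α : Type} (key : α → Int) (p : List α) (x : α) (r : List Nat)
    (hx : ∀ k ∈ r, ¬ key x = (k : Int)) :
    r.flatMap (fun (k : Nat) => (p ++ [x]).filter (fun y => key y = (k : Int)))
      = r.flatMap (fun (k : Nat) => p.filter (fun y => key y = (k : Int))) := by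
  induction r with
  | nil => rfl
  | cons k t ih =>
    rw [List.flatMap_cons, List.flatMap_cons, ih (fun m hm => hx m (by simp [hm]))]
    have : [x].filter (fun y => decide (key y = (k : Int))) = [] := by
      simp [hx k (by simp)]
    rw [List.filter_append, this, List.append_nil]

theorem sorted_eq_flatMap_filter {α : Type} (key : α → Int) (n : Nat) (xs : List α)
    (h : ∀ x ∈ xs, 0 ≤ key x ∧ key x ≤ (n : Int)) :
    PySem.List.sorted xs key false
      = (List.range (n + 1)).flatMap (fun (k : Nat) => xs.filter (fun x => key x = (k : Int))) := by
  induction xs using List.reverseRecOn with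
  | nil =>
    have h1 : PySem.List.sorted ([] : List α) key false = [] := by
      rw [PySem.List.sorted_eq_nil_iff]
    rw [h1]
    simp
  | append_singleton p x ih =>
    have hx := h x (by simp)
    have hp : ∀ y ∈ p, 0 ≤ key y ∧ key y ≤ (n : Int) := fun y hy => h y (by simp [hy])
    rw [PySem.List.sorted_eq_foldl_insertBy, List.foldl_append, ← PySem.List.sorted_eq_foldl_insertBy,
        ih hp]
    simp only [List.foldl_cons, List.foldl_nil]
    set j : Nat := (key x).toNat with hj
    have hkx : key x = (j : Int) := by omega
    have hjn : j ≤ n := by omega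
    have hsplit : List.range (n + 1) = (List.range j ++ [j]) ++ (List.range (n - j)).map (fun i => (j + 1) + i) := by
      rw [← List.range_succ]
      have : n + 1 = (j + 1) + (n - j) := by omega
      rw [this, List.range_add]
    rw [hsplit]
    rw [List.flatMap_append, List.flatMap_append, List.flatMap_append, List.flatMap_append]
    rw [insertBy_split key x _ _ ?h1 ?h2]
    case h1 =>
      intro y hy
      rw [List.mem_append] at hy
      rcases hy with hy | hy
      · simp only [List.mem_flatMap, List.mem_filter, List.mem_range] at hy
        obtain ⟨k, hk, _, hky⟩ := hy
        have : key y = (k : Int) := of_decide_eq_true hky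
        omega
      · simp only [List.flatMap_cons, List.flatMap_nil, List.append_nil, List.mem_filter] at hy
        have : key y = (j : Int) := of_decide_eq_true hy.2
        omega
    case h2 =>
      intro y hy
      simp only [List.mem_flatMap, List.mem_map, List.mem_range, List.mem_filter] at hy
      obtain ⟨k, ⟨i, hi, rfl⟩, _, hky⟩ := hy
      have : key y = ((j + 1 + i : Nat) : Int) := of_decide_eq_true hky
      omega
    rw [flatMap_filter_congr key p x (List.range j) (by intro k hk; simp only [List.mem_range] at hk; omega)]
    rw [flatMap_filter_congr key p x ((List.range (n - j)).map (fun i => (j + 1) + i)) ?hhi]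
    case hhi =>
      intro k hk
      simp only [List.mem_map, List.mem_range] at hk
      obtain ⟨i, hi, rfl⟩ := hk
      omega
    simp only [List.flatMap_cons, List.flatMap_nil, List.append_nil, List.filter_append]
    have hxj : [x].filter (fun y => decide (key y = (j : Int))) = [x] := by simp [hkx]
    rw [hxj]
    simp [List.append_assoc]



theorem pvKey_bound (list1 : List String) (item : String) :
    0 ≤ pvKey list1 item ∧ pvKey list1 item ≤ (list1.length : Int) := by
  unfold pvKey
  rw [PySem.Dict.getD_eq_get?_getD]
  cases h : (pvOrderDict list1).get? (pvPrefix item) with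
  | none => simp
  | some v =>
    have := pvOrderDict_value_bound list1 (pvPrefix item) v h
    simp only [Option.getD_some]
    omega

theorem set_map_range {β : Type} (n j : Nat) (f : Nat → β) (v : β) (hj : j < n) :
    ((List.range n).map f).set j v = (List.range n).map (fun k => if k = j then v else f k) := by
  apply List.ext_getElem
  · simp
  · intro i h1 h2
    simp only [List.getElem_set, List.getElem_map, List.getElem_range]
    simp only [List.length_map, List.length_range] at h1
    split_ifs with hij hij' hij'
    · rfl
    · omega
    · omega
    · rfl

theorem getD_map_range' {β : Type} (n j : Nat) (f : Nat → β) (d : β) (hj : j < n) :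
    ((List.range n).map f).getD j d = f j := by
  rw [List.getD_eq_getElem _ _ (by simpa using hj)]
  simp

theorem filter_append_key (list1 : List String) (q : List String) (x : String) (k : Nat) :
    (q ++ [x]).filter (fun y => pvKey list1 y = (k : Int))
      = q.filter (fun y => pvKey list1 y = (k : Int))
        ++ if pvKey list1 x = (k : Int) then [x] else [] := by
  rw [List.filter_append]
  congr 1
  by_cases h : pvKey list1 x = (k : Int) <;> simp [h]



def pvBk (list1 : List String) (q : List String) : List (List String) :=
  (List.range list1.length).map (fun (j : Nat) => q.filter (fun x => pvKey list1 x = (j : Int)))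
def pvNf (list1 : List String) (q : List String) : List String :=
  q.filter (fun x => pvKey list1 x = (list1.length : Int))

theorem pvStep_eq (list1 : List String) (q : List String) (x : String) :
    pvStep (pvOrderDict list1) (pvBk list1 q, pvNf list1 q) x
      = (pvBk list1 (q ++ [x]), pvNf list1 (q ++ [x])) := by
  unfold pvStep
  cases hg : (pvOrderDict list1).get? (pvPrefix x) with
  | none =>
    have hkx : pvKey list1 x = (list1.length : Int) := by
      unfold pvKey; rw [PySem.Dict.getD_eq_get?_getD, hg]; rfl
    simp only
    have h1 : pvBk list1 (q ++ [x]) = pvBk list1 q := by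
      unfold pvBk
      apply List.map_congr_left
      intro j hj
      simp only [List.mem_range] at hj
      rw [filter_append_key, if_neg (by intro h; rw [hkx] at h; exact absurd (by exact_mod_cast h) (by omega)), List.append_nil]
    have h2 : pvNf list1 (q ++ [x]) = pvNf list1 q ++ [x] := by
      unfold pvNf
      rw [filter_append_key, if_pos hkx]
    rw [h1, h2]
  | some i =>
    obtain ⟨hi0, hin⟩ := pvOrderDict_value_bound list1 (pvPrefix x) i hg
    have hkx : pvKey list1 x = i := by
      unfold pvKey; rw [PySem.Dict.getD_eq_get?_getD, hg]; rfl
    have hjn : i.toNat < list1.length := by omega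
    have hkx' : pvKey list1 x = (i.toNat : Int) := by omega
    simp only
    have hget : (pvBk list1 q).getD i.toNat [] = q.filter (fun y => pvKey list1 y = (i.toNat : Int)) := by
      unfold pvBk; exact getD_map_range' _ _ _ _ hjn
    have h2 : pvNf list1 (q ++ [x]) = pvNf list1 q := by
      unfold pvNf
      rw [filter_append_key, if_neg (by intro h; rw [hkx] at h; omega), List.append_nil]
    rw [hget, h2]
    unfold pvBk
    rw [set_map_range _ _ _ _ hjn]
    congr 1
    apply List.map_congr_left
    intro k hk
    simp only [List.mem_range] at hk
    rw [filter_append_key]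
    by_cases hkj : k = i.toNat
    · subst hkj
      rw [if_pos rfl, if_pos hkx']
    · rw [if_neg hkj, if_neg (by intro h; rw [hkx'] at h; exact hkj (by exact_mod_cast h.symm)), List.append_nil]

theorem bucket_fold (list1 : List String) (l : List String) : ∀ (q : List String),
    l.foldl (pvStep (pvOrderDict list1)) (pvBk list1 q, pvNf list1 q)
      = (pvBk list1 (q ++ l), pvNf list1 (q ++ l)) := by
  induction l with
  | nil => intro q; simp
  | cons x t ih =>
    intro q
    rw [List.foldl_cons, pvStep_eq, ih (q ++ [x])]
    simp

-- ===== VERDICT (by name: the statement is the Claim_ definition above) =====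
theorem sort_list2_by_list1_spec : Claim_equal_sort_list2_by_list1 := by
  intro list1 list2 _
  unfold Spec_sort_list2_by_list1 sort_list2_by_list1 sort_list2_by_list1_alt
  have hinit : (List.replicate list1.length ([] : List String), ([] : List String))
      = (pvBk list1 [], pvNf list1 []) := by
    unfold pvBk pvNf
    simp [List.map_const']
  simp only []
  rw [hinit, bucket_fold list1 list2 []]
  simp only [List.nil_append]
  rw [PySem.List.foldl_append_eq_flatten]
  unfold pvBk pvNf
  rw [List.nil_append, ← List.flatMap_def]
  have hkey : (fun item => (pvOrderDict list1).getD (pvPrefix item) (list1.length : Int))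
      = pvKey list1 := rfl
  rw [hkey, sorted_eq_flatMap_filter (pvKey list1) list1.length list2 (fun x _ => pvKey_bound list1 x)]
  rw [List.range_succ, List.flatMap_append]
  simp
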